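-- pv_equiv track=rewrite | github.com/renjianguojinqianfan/Project-Bootstrap-Harness | src/harness_init/core.py | _is_excluded_quick
-- ===== SOURCE A (Python) =====
-- _QUICK_MODE_EXCLUSIONS: frozenset[str] = frozenset(
--     {
--         "CLAUDE.md",
--         ".cursorrules",
--         "opencode.yaml",
--         ".github/",
--         ".pre-commit-config.yaml",
--         "docs/decisions/",
--         "docs/PROJECT_MAP.md",
--         "docs/context.md",
--         "scripts/",
--         "configs/",
--         "README.en.md",
--         "tests/test_harness.py",
--     }
-- )
--
-- def _is_excluded_quick(rel_path: str, package_name: str) -> bool: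
--     """判断相对路径是否在 quick 模式下被排除。"""
--     substituted = rel_path.replace("{package_name}", package_name)
--     for exclusion in _QUICK_MODE_EXCLUSIONS:
--         exc = exclusion.replace("{package_name}", package_name)
--         if exc.endswith("/"):
--             if substituted.startswith(exc) or substituted + "/" == exc:
--                 return True
--         else:
--             if substituted == exc:
--                 return True
--     return False
-- ===== SOURCE B (Python) =====
-- _QUICK_MODE_EXCLUSIONS: frozenset[str] = frozenset(
--     {
--         "CLAUDE.md",
--         ".cursorrules",
--         "opencode.yaml",
--         ".github/",
--         ".pre-commit-config.yaml",
--         "docs/decisions/",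
--         "docs/PROJECT_MAP.md",
--         "docs/context.md",
--         "scripts/",
--         "configs/",
--         "README.en.md",
--         "tests/test_harness.py",
--     }
-- )
--
-- # Precomputed split of the exclusion set: exact entries vs. directory prefixes.
-- # (No entry contains "{package_name}", so substituting into them is a no-op.)
-- _EXACT: frozenset[str] = frozenset(e for e in _QUICK_MODE_EXCLUSIONS if not e.endswith("/"))
-- _PREFIXES: tuple[str, ...] = tuple(sorted(e for e in _QUICK_MODE_EXCLUSIONS if e.endswith("/")))
--
--
-- def _is_excluded_quick(rel_path: str, package_name: str) -> bool:
--     substituted = rel_path.replace("{package_name}", package_name)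
--     if substituted in _EXACT:
--         return True
--     return any(substituted.startswith(p) or substituted + "/" == p for p in _PREFIXES)
-- ===== Notes on version B (the rewrite author's own statement) =====
-- stated objective: simpler
-- what changed: Splits the exclusion set at module load into a frozenset of exact entries and a tuple of directory prefixes, so the function is one O(1) set-membership test plus a prefix-only any() pass, instead of a branch-per-item scan that re-substitutes every exclusion on each call.
import Mathlib
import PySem

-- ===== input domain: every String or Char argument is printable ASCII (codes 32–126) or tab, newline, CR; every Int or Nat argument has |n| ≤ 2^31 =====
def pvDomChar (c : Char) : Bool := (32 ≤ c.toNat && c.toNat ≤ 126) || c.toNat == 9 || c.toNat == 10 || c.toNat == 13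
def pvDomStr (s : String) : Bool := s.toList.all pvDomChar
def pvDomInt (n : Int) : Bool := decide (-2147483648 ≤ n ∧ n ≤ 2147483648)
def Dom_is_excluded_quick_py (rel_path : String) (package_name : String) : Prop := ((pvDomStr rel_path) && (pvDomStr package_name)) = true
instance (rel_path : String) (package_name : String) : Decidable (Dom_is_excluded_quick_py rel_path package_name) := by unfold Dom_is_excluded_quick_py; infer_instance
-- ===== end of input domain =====

-- B splits the exclusion set into a precomputed exact-match list and a directory-prefix list:
-- one membership test plus a prefix-only pass, instead of A's branch-per-item scan (simpler).


-- ===== PORT A =====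
def pvExclusionsA : List String :=
  ["CLAUDE.md", ".cursorrules", "opencode.yaml", ".github/", ".pre-commit-config.yaml",
   "docs/decisions/", "docs/PROJECT_MAP.md", "docs/context.md", "scripts/", "configs/",
   "README.en.md", "tests/test_harness.py"]

def pvLoopA (substituted : String) (package_name : String) : List String → Bool
  | [] => false
  | exclusion :: rest =>
    let exc := PySem.Str.replace exclusion "{package_name}" package_name
    if PySem.Str.endswith exc "/" then
      if PySem.Str.startswith substituted exc || (substituted ++ "/") == exc then true
      else pvLoopA substituted package_name rest
    else
      if substituted == exc then true
      else pvLoopA substituted package_name rest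

def is_excluded_quick_py (rel_path : String) (package_name : String) : Bool :=
  let substituted := PySem.Str.replace rel_path "{package_name}" package_name
  pvLoopA substituted package_name pvExclusionsA

-- ===== PORT B =====
def pvExact : List String :=
  ["CLAUDE.md", ".cursorrules", "opencode.yaml", ".pre-commit-config.yaml",
   "docs/PROJECT_MAP.md", "docs/context.md", "README.en.md", "tests/test_harness.py"]

def pvPrefixes : List String := [".github/", "configs/", "docs/decisions/", "scripts/"]

def is_excluded_quick_py_alt (rel_path : String) (package_name : String) : Bool :=
  let substituted := PySem.Str.replace rel_path "{package_name}" package_name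
  if pvExact.contains substituted then true
  else pvPrefixes.any (fun p => PySem.Str.startswith substituted p || (substituted ++ "/") == p)

-- ===== PRECONDITION & SPEC =====
def Spec_is_excluded_quick_py (rel_path : String) (package_name : String) (out : Bool) : Prop := out = is_excluded_quick_py_alt rel_path package_name
instance (rel_path : String) (package_name : String) (out : Bool) : Decidable (Spec_is_excluded_quick_py rel_path package_name out) := by unfold Spec_is_excluded_quick_py; infer_instance

-- ===== CLAIM (what is proved, stated in full; the proofs are below) =====
def Claim_equal_is_excluded_quick_py : Prop := ∀ (rel_path : String) (package_name : String), Dom_is_excluded_quick_py rel_path package_name → Spec_is_excluded_quick_py rel_path package_name (is_excluded_quick_py rel_path package_name)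

-- ===== LEMMAS AND PROOFS =====

theorem pv_rep1 (p : String) : PySem.Str.replace "CLAUDE.md" "{package_name}" p = "CLAUDE.md" := by
  simp [PySem.Str.replace, PySem.Chars.replace, PySem.Chars.replace.go]
theorem pv_rep2 (p : String) : PySem.Str.replace ".cursorrules" "{package_name}" p = ".cursorrules" := by
  simp [PySem.Str.replace, PySem.Chars.replace, PySem.Chars.replace.go]
theorem pv_rep3 (p : String) : PySem.Str.replace "opencode.yaml" "{package_name}" p = "opencode.yaml" := by
  simp [PySem.Str.replace, PySem.Chars.replace, PySem.Chars.replace.go]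
theorem pv_rep4 (p : String) : PySem.Str.replace ".github/" "{package_name}" p = ".github/" := by
  simp [PySem.Str.replace, PySem.Chars.replace, PySem.Chars.replace.go]
theorem pv_rep5 (p : String) : PySem.Str.replace ".pre-commit-config.yaml" "{package_name}" p = ".pre-commit-config.yaml" := by
  simp [PySem.Str.replace, PySem.Chars.replace, PySem.Chars.replace.go]
theorem pv_rep6 (p : String) : PySem.Str.replace "docs/decisions/" "{package_name}" p = "docs/decisions/" := by
  simp [PySem.Str.replace, PySem.Chars.replace, PySem.Chars.replace.go]
theorem pv_rep7 (p : String) : PySem.Str.replace "docs/PROJECT_MAP.md" "{package_name}" p = "docs/PROJECT_MAP.md" := by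
  simp [PySem.Str.replace, PySem.Chars.replace, PySem.Chars.replace.go]
theorem pv_rep8 (p : String) : PySem.Str.replace "docs/context.md" "{package_name}" p = "docs/context.md" := by
  simp [PySem.Str.replace, PySem.Chars.replace, PySem.Chars.replace.go]
theorem pv_rep9 (p : String) : PySem.Str.replace "scripts/" "{package_name}" p = "scripts/" := by
  simp [PySem.Str.replace, PySem.Chars.replace, PySem.Chars.replace.go]
theorem pv_rep10 (p : String) : PySem.Str.replace "configs/" "{package_name}" p = "configs/" := by
  simp [PySem.Str.replace, PySem.Chars.replace, PySem.Chars.replace.go]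
theorem pv_rep11 (p : String) : PySem.Str.replace "README.en.md" "{package_name}" p = "README.en.md" := by
  simp [PySem.Str.replace, PySem.Chars.replace, PySem.Chars.replace.go]
theorem pv_rep12 (p : String) : PySem.Str.replace "tests/test_harness.py" "{package_name}" p = "tests/test_harness.py" := by
  simp [PySem.Str.replace, PySem.Chars.replace, PySem.Chars.replace.go]

theorem pv_end1 : PySem.Str.endswith "CLAUDE.md" "/" = false := by decide
theorem pv_end2 : PySem.Str.endswith ".cursorrules" "/" = false := by decide
theorem pv_end3 : PySem.Str.endswith "opencode.yaml" "/" = false := by decide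
theorem pv_end4 : PySem.Str.endswith ".github/" "/" = true := by decide
theorem pv_end5 : PySem.Str.endswith ".pre-commit-config.yaml" "/" = false := by decide
theorem pv_end6 : PySem.Str.endswith "docs/decisions/" "/" = true := by decide
theorem pv_end7 : PySem.Str.endswith "docs/PROJECT_MAP.md" "/" = false := by decide
theorem pv_end8 : PySem.Str.endswith "docs/context.md" "/" = false := by decide
theorem pv_end9 : PySem.Str.endswith "scripts/" "/" = true := by decide
theorem pv_end10 : PySem.Str.endswith "configs/" "/" = true := by decide
theorem pv_end11 : PySem.Str.endswith "README.en.md" "/" = false := by decide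
theorem pv_end12 : PySem.Str.endswith "tests/test_harness.py" "/" = false := by decide
set_option maxRecDepth 8000 in
set_option maxHeartbeats 2000000 in
theorem pv_loop_eq (s p : String) :
    pvLoopA s p pvExclusionsA =
      (if pvExact.contains s then true
       else pvPrefixes.any (fun q => PySem.Str.startswith s q || (s ++ "/") == q)) := by
  simp only [pvExclusionsA]
  simp only [pvLoopA]
  simp only [pv_rep1, pv_rep2, pv_rep3, pv_rep4, pv_rep5, pv_rep6,
    pv_rep7, pv_rep8, pv_rep9, pv_rep10, pv_rep11, pv_rep12]
  simp only [pv_end1, pv_end2, pv_end3, pv_end4, pv_end5, pv_end6, pv_end7, pv_end8, pv_end9, pv_end10, pv_end11, pv_end12, if_true, Bool.if_true_left]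
  simp only [Bool.false_eq_true, if_false, pvExact, pvPrefixes,
    List.contains_cons, List.contains_nil, List.any_cons, List.any_nil]
  rw [Bool.eq_iff_iff]
  simp only [Bool.or_eq_true, decide_eq_true_eq, beq_iff_eq, Bool.false_eq_true, or_false]
  generalize (s = "CLAUDE.md") = e1
  generalize (s = ".cursorrules") = e2
  generalize (s = "opencode.yaml") = e3
  generalize (s = ".pre-commit-config.yaml") = e4
  generalize (s = "docs/PROJECT_MAP.md") = e5
  generalize (s = "docs/context.md") = e6
  generalize (s = "README.en.md") = e7
  generalize (s = "tests/test_harness.py") = e8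
  generalize (PySem.Str.startswith s ".github/" = true ∨ s ++ "/" = ".github/") = q1
  generalize (PySem.Str.startswith s "docs/decisions/" = true ∨ s ++ "/" = "docs/decisions/") = q2
  generalize (PySem.Str.startswith s "scripts/" = true ∨ s ++ "/" = "scripts/") = q3
  generalize (PySem.Str.startswith s "configs/" = true ∨ s ++ "/" = "configs/") = q4
  tauto

-- ===== VERDICT (by name: the statement is the Claim_ definition above) =====
theorem is_excluded_quick_py_spec : Claim_equal_is_excluded_quick_py := by
  intro rel_path package_name _
  unfold Spec_is_excluded_quick_py
  unfold is_excluded_quick_py is_excluded_quick_py_alt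
  exact pv_loop_eq (PySem.Str.replace rel_path "{package_name}" package_name) package_name
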